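-- pv_equiv track=rewrite | github.com/hociss/CCC-Senior-Problems-Python | 2011_S3.py | check
-- ===== SOURCE A (Python) =====
-- def check (m, x, y):
--     if (x > (5**(m-1) - 1)  and x < (4*(5**(m-1))) and y < (5**(m-1))) or (x > (2*(5**(m-1))) - 1 and x < (3*(5**(m-1))) and y < (2*(5**(m-1)))):
--         return("crystal")
--     elif x > (5**(m-1) - 1) and x < (2*(5**(m-1))) and y > (5**(m-1) - 1) and y < (2*(5**(m-1))) and m > 1:
--         return(check(m-1, x - (5**(m-1)), y - (5**(m-1))))
--     elif x > (3*(5**(m-1))) - 1 and x < (4*(5**(m-1))) and y > (5**(m-1) - 1) and y < (2*(5**(m-1))) and m > 1: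
--         return(check(m-1, x - (3*(5**(m-1))), y - (5**(m-1))))
--     elif x > (2*(5**(m-1))) - 1 and x < (3*(5**(m-1))) and y > (2*(5**(m-1))) - 1 and y < (3*(5**(m-1))) and m > 1:
--         return(check(m-1, x - (2*(5**(m-1))), y - (2*(5**(m-1)))))
--     else:
--         return("empty")
-- ===== SOURCE B (Python) =====
-- def check(m, x, y):
--     size = 5 ** (m - 1)
--     while True:
--         cx, cy = x // size, y // size
--         if cx in (1, 2, 3) and cy <= 0 or (cx, cy) == (2, 1):
--             return "crystal"
--         if m > 1 and (cx, cy) in ((1, 1), (3, 1), (2, 2)):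
--             x -= cx * size
--             y -= cy * size
--             m -= 1
--             size //= 5
--         else:
--             return "empty"
-- ===== Notes on version B (the rewrite author's own statement) =====
-- stated objective: faster
-- what changed: Replaces A's tail recursion over four hand-written inequality bands with an iterative loop that floor-divides (x,y) by the cell size to get base-5 cell coordinates and tests them against the crystal/recurse cell sets; the power 5**(m-1) is computed once and then divided by 5 per level instead of being recomputed many times per level.
-- outside the precondition, e.g. on check(0, 0, 0): A returns 'crystal', B returns 'empty'
import Mathlib
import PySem

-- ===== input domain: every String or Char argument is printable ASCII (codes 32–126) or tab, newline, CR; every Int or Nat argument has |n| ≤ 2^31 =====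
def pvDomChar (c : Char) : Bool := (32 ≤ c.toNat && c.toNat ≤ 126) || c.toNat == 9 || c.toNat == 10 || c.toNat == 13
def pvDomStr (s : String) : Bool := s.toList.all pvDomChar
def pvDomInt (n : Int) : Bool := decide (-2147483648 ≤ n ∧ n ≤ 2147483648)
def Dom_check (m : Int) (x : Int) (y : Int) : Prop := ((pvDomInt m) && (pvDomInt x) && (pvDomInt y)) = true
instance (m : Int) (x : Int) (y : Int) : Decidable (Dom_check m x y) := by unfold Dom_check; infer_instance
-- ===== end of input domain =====

-- B replaces A's tail recursion over inequality bands by an iterative loop on base-5 cell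
-- coordinates (floor division by the current cell size); objective: alternative decomposition.


-- ===== PORT A =====
-- Literal port of A. Python's 5**(m-1) is an integer power exactly when m ≥ 1 (= Pre_check);
-- for m ≤ 0 Python computes a float power, excluded by Pre_check, here totalised with .toNat.
def check (m : Int) (x : Int) (y : Int) : String :=
  if (x > 5 ^ (m - 1).toNat - 1 ∧ x < 4 * 5 ^ (m - 1).toNat ∧ y < 5 ^ (m - 1).toNat) ∨
     (x > 2 * 5 ^ (m - 1).toNat - 1 ∧ x < 3 * 5 ^ (m - 1).toNat ∧ y < 2 * 5 ^ (m - 1).toNat) then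
    "crystal"
  else if h1 : x > 5 ^ (m - 1).toNat - 1 ∧ x < 2 * 5 ^ (m - 1).toNat ∧
               y > 5 ^ (m - 1).toNat - 1 ∧ y < 2 * 5 ^ (m - 1).toNat ∧ m > 1 then
    check (m - 1) (x - 5 ^ (m - 1).toNat) (y - 5 ^ (m - 1).toNat)
  else if h2 : x > 3 * 5 ^ (m - 1).toNat - 1 ∧ x < 4 * 5 ^ (m - 1).toNat ∧
               y > 5 ^ (m - 1).toNat - 1 ∧ y < 2 * 5 ^ (m - 1).toNat ∧ m > 1 then
    check (m - 1) (x - 3 * 5 ^ (m - 1).toNat) (y - 5 ^ (m - 1).toNat)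
  else if h3 : x > 2 * 5 ^ (m - 1).toNat - 1 ∧ x < 3 * 5 ^ (m - 1).toNat ∧
               y > 2 * 5 ^ (m - 1).toNat - 1 ∧ y < 3 * 5 ^ (m - 1).toNat ∧ m > 1 then
    check (m - 1) (x - 2 * 5 ^ (m - 1).toNat) (y - 2 * 5 ^ (m - 1).toNat)
  else
    "empty"
termination_by m.toNat
decreasing_by
  · omega
  · omega
  · omega

-- ===== PORT B =====
-- Port of Source B's while-loop as tail recursion; Python's local names cx, cy are inlined
-- (pure floor divisions). size starts as 5**(m-1) (integer exactly on Pre_check) and is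
-- floor-divided by 5 at each level.
def checkAltLoop (m : Int) (x : Int) (y : Int) (size : Int) : String :=
  if (PySem.Int.floordiv x size = 1 ∨ PySem.Int.floordiv x size = 2 ∨ PySem.Int.floordiv x size = 3) ∧
       PySem.Int.floordiv y size ≤ 0 ∨
     (PySem.Int.floordiv x size = 2 ∧ PySem.Int.floordiv y size = 1) then
    "crystal"
  else if _h : m > 1 ∧ ((PySem.Int.floordiv x size = 1 ∧ PySem.Int.floordiv y size = 1) ∨
                       (PySem.Int.floordiv x size = 3 ∧ PySem.Int.floordiv y size = 1) ∨
                       (PySem.Int.floordiv x size = 2 ∧ PySem.Int.floordiv y size = 2)) then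
    checkAltLoop (m - 1) (x - PySem.Int.floordiv x size * size)
      (y - PySem.Int.floordiv y size * size) (PySem.Int.floordiv size 5)
  else
    "empty"
termination_by m.toNat
decreasing_by omega

def check_alt (m : Int) (x : Int) (y : Int) : String :=
  checkAltLoop m x y (5 ^ (m - 1).toNat)

-- ===== PRECONDITION & SPEC =====
-- Pre_ excludes m ≤ 0: there Python A's 5**(m-1) is a FLOAT power (underflowing to 0.0 for very
-- negative m), so A's value on that degenerate corner is an accident of float comparison
-- semantics outside the int type convention; B does its natural integer-cell thing there.
def Pre_check (m : Int) (x : Int) (y : Int) : Prop := 1 ≤ m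
instance (m : Int) (x : Int) (y : Int) : Decidable (Pre_check m x y) := by unfold Pre_check; infer_instance
def pvWitness_check : Int × Int × Int := (2, 7, 6)
def Spec_check (m : Int) (x : Int) (y : Int) (out : String) : Prop := out = check_alt m x y
instance (m : Int) (x : Int) (y : Int) (out : String) : Decidable (Spec_check m x y out) := by unfold Spec_check; infer_instance

-- ===== CLAIM (what is proved, stated in full; the proofs are below) =====
def Claim_equal_check : Prop := ∀ (m : Int) (x : Int) (y : Int), Dom_check m x y → Pre_check m x y → Spec_check m x y (check m x y)

-- ===== LEMMAS AND PROOFS =====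

lemma size_step (m : Int) (hm : 2 ≤ m) :
    PySem.Int.floordiv ((5:Int) ^ (m - 1).toNat) 5 = 5 ^ (m - 1 - 1).toNat := by
  have ht : (m - 1).toNat = (m - 1 - 1).toNat + 1 := by omega
  rw [ht, pow_succ, PySem.Int.floordiv_eq_iff_of_pos (by norm_num)]
  constructor <;> omega

lemma check_main : ∀ (n : ℕ) (m x y : Int), 1 ≤ m → m.toNat ≤ n →
    check m x y = checkAltLoop m x y (5 ^ (m - 1).toNat) := by
  intro n
  induction n with
  | zero => intro m x y hm hn; omega
  | succ n ih =>
    intro m x y hm hn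
    rw [check, checkAltLoop]
    set s : Int := (5:Int) ^ (m - 1).toNat with hs_def
    have hs : 0 < s := by positivity
    have hgx : ∀ k : Int, (PySem.Int.floordiv x s = k ↔ k * s ≤ x ∧ x < (k + 1) * s) := by
      intro k; exact PySem.Int.floordiv_eq_iff_of_pos hs
    have hgy : ∀ k : Int, (PySem.Int.floordiv y s = k ↔ k * s ≤ y ∧ y < (k + 1) * s) := by
      intro k; exact PySem.Int.floordiv_eq_iff_of_pos hs
    have hy0 : (PySem.Int.floordiv y s ≤ 0) ↔ y < s := by
      have h1 : (1 ≤ PySem.Int.floordiv y s) ↔ 1 * s ≤ y := PySem.Int.le_floordiv_iff_mul_le hs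
      omega
    simp only [hgx, hgy, hy0]
    split_ifs <;> try rfl
    all_goals try omega
    -- the three cases in which both programs descend one level
    · have e1 : PySem.Int.floordiv x s = 1 := (hgx 1).mpr (by omega)
      have e2 : PySem.Int.floordiv y s = 1 := (hgy 1).mpr (by omega)
      rw [e1, e2, hs_def, size_step m (by omega)]
      simp only [one_mul]
      exact ih (m - 1) _ _ (by omega) (by omega)
    · have e1 : PySem.Int.floordiv x s = 3 := (hgx 3).mpr (by omega)
      have e2 : PySem.Int.floordiv y s = 1 := (hgy 1).mpr (by omega)
      rw [e1, e2, hs_def, size_step m (by omega)]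
      simp only [one_mul]
      exact ih (m - 1) _ _ (by omega) (by omega)
    · have e1 : PySem.Int.floordiv x s = 2 := (hgx 2).mpr (by omega)
      have e2 : PySem.Int.floordiv y s = 2 := (hgy 2).mpr (by omega)
      rw [e1, e2, hs_def, size_step m (by omega)]
      exact ih (m - 1) _ _ (by omega) (by omega)

-- ===== VERDICT (by name: the statement is the Claim_ definition above) =====
theorem check_spec : Claim_equal_check := by
  intro m x y _ hpre
  unfold Spec_check check_alt
  exact check_main m.toNat m x y hpre (le_refl _)
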